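-- pv_equiv track=rewrite | github.com/FDA/Identifying-Gene-Variants-of-Viral-Interactors | compute_features.py | convert_position2
-- ===== SOURCE A (Python) =====
-- def convert_position2(seq, position, space="-"):
-- 	charcount = 0
-- 	increment = 0
-- 	while charcount <= position and increment < len(seq):
-- 		if seq[increment] != space:
-- 			charcount += 1
-- 		increment += 1
-- 	return(increment-1)
-- ===== SOURCE B (Python) =====
-- def convert_position2(seq, position, space="-"):
-- 	indices = [i for i, c in enumerate(seq) if c != space]
-- 	if position < 0:
-- 		return -1
-- 	if position < len(indices):
-- 		return indices[position]
-- 	return len(seq) - 1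
-- ===== Notes on version B (the rewrite author's own statement) =====
-- stated objective: alternative
-- what changed: Replaces the early-terminating counting while-loop with a one-pass materialized list of all non-space indices followed by a direct lookup (or -1 / len(seq)-1 for out-of-range positions).
import Mathlib
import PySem

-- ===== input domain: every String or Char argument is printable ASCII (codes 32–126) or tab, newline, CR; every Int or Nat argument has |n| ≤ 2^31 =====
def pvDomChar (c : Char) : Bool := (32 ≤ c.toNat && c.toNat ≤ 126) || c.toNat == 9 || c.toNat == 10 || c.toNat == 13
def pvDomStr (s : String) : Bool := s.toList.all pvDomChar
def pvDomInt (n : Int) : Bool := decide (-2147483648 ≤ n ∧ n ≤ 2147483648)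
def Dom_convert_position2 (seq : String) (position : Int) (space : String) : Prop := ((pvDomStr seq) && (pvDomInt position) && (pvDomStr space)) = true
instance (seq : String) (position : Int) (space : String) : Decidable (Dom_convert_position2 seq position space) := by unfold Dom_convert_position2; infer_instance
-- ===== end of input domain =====

-- B builds the list of all non-space indices in one pass and answers by direct lookup, instead of A's counting scan (alternative decomposition, same result).
-- ===== PORT A =====
def pvGoA (position : Int) (space : String) : List Char → Int → Int → Int
  | [], _, inc => inc - 1
  | c :: rest, cc, inc =>
      if cc ≤ position then
        if String.ofList [c] ≠ space then pvGoA position space rest (cc + 1) (inc + 1)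
        else pvGoA position space rest cc (inc + 1)
      else inc - 1

def convert_position2 (seq : String) (position : Int) (space : String) : Int :=
  pvGoA position space seq.toList 0 0

-- ===== PORT B =====
-- transliteration of the comprehension [i for i, c in enumerate(seq) if c != space]
def pvIdxsB (space : String) : Nat → List Char → List Int
  | _, [] => []
  | i, c :: rest =>
      if String.ofList [c] ≠ space then (i : Int) :: pvIdxsB space (i + 1) rest
      else pvIdxsB space (i + 1) rest

def convert_position2_alt (seq : String) (position : Int) (space : String) : Int :=
  let indices := pvIdxsB space 0 seq.toList
  if position < 0 then -1
  else if position < (indices.length : Int) then (indices[position.toNat]?).getD 0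
  else (seq.toList.length : Int) - 1

-- ===== PRECONDITION & SPEC =====
def Spec_convert_position2 (seq : String) (position : Int) (space : String) (out : Int) : Prop := out = convert_position2_alt seq position space
instance (seq : String) (position : Int) (space : String) (out : Int) : Decidable (Spec_convert_position2 seq position space out) := by unfold Spec_convert_position2; infer_instance

-- ===== CLAIM (what is proved, stated in full; the proofs are below) =====
def Claim_equal_convert_position2 : Prop := ∀ (seq : String) (position : Int) (space : String), Dom_convert_position2 seq position space → Spec_convert_position2 seq position space (convert_position2 seq position space)

-- ===== LEMMAS AND PROOFS =====

-- index (relative, as Nat) of the k-th non-space character of a list, if any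
def pvNth (space : String) : List Char → Nat → Option Nat
  | [], _ => none
  | c :: rest, k =>
      if String.ofList [c] ≠ space then
        if k = 0 then some 0 else (pvNth space rest (k - 1)).map (· + 1)
      else (pvNth space rest k).map (· + 1)

theorem pvGoA_stop (position : Int) (space : String) (l : List Char) (cc inc : Int)
    (h : position < cc) : pvGoA position space l cc inc = inc - 1 := by
  cases l with
  | nil => rfl
  | cons c rest => simp [pvGoA, not_le.mpr h]

theorem pvGoA_eq (position : Int) (space : String) (l : List Char) :
    ∀ cc inc : Int, cc ≤ position →
      pvGoA position space l cc inc =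
        match pvNth space l (position - cc).toNat with
        | some j => inc + j
        | none => inc + l.length - 1 := by
  induction l with
  | nil => intro cc inc h; simp [pvGoA, pvNth]
  | cons c rest ih =>
    intro cc inc h
    by_cases hc : String.ofList [c] = space
    · rw [pvGoA, if_pos h, if_neg (by simp [hc]), ih cc (inc + 1) h]
      simp only [pvNth, hc, ne_eq, not_true_eq_false, if_false]
      cases hn : pvNth space rest (position - cc).toNat with
      | none => simp [hn]; ring
      | some j => simp [hn]; ring
    · by_cases he : cc = position
      · subst he
        rw [pvGoA, if_pos h, if_pos (by simp [hc])]
        rw [pvGoA_stop _ _ _ _ _ (by omega)]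
        simp [pvNth, hc]
      · have hlt : cc + 1 ≤ position := by omega
        rw [pvGoA, if_pos h, if_pos (by simp [hc]), ih (cc + 1) (inc + 1) hlt]
        have hk : (position - cc).toNat = ((position - (cc + 1)).toNat) + 1 := by omega
        simp only [pvNth, hc, ne_eq, not_false_eq_true, if_true, hk,
          Nat.add_sub_cancel, Nat.succ_ne_zero, if_false]
        cases hn : pvNth space rest (position - (cc + 1)).toNat with
        | none => simp [hn]; ring
        | some j => simp [hn]; ring

theorem pvIdxsB_get (space : String) (l : List Char) :
    ∀ (i : Nat) (k : Nat),
      (pvIdxsB space i l)[k]? = (pvNth space l k).map (fun j => (i : Int) + j) := by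
  induction l with
  | nil => intro i k; simp [pvIdxsB, pvNth]
  | cons c rest ih =>
    intro i k
    by_cases hc : String.ofList [c] = space
    · simp only [pvIdxsB, hc, ne_eq, not_true_eq_false, if_false, pvNth, ih (i + 1) k]
      cases hn : pvNth space rest k with
      | none => simp [hn]
      | some j => simp [hn]; push_cast; ring
    · simp only [pvIdxsB, hc, ne_eq, not_false_eq_true, if_true, pvNth]
      cases k with
      | zero => simp
      | succ k' =>
        simp only [List.getElem?_cons_succ, ih (i + 1) k', Nat.succ_ne_zero, if_false]
        cases hn : pvNth space rest k' with
        | none => simp [hn]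
        | some j => simp [hn]; push_cast; ring

-- ===== VERDICT (by name: the statement is the Claim_ definition above) =====
theorem convert_position2_spec : Claim_equal_convert_position2 := by
  intro seq position space _
  unfold Spec_convert_position2 convert_position2 convert_position2_alt
  by_cases hneg : position < 0
  · rw [pvGoA_stop _ _ _ _ _ (by omega)]
    simp [hneg]
  · have hge : (0 : Int) ≤ position := by omega
    rw [pvGoA_eq position space seq.toList 0 0 hge]
    simp only [hneg, if_false, Int.sub_zero]
    have hget := pvIdxsB_get space seq.toList 0 position.toNat
    cases hn : pvNth space seq.toList position.toNat with
    | some j =>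
      rw [hn] at hget
      have hk : position.toNat < (pvIdxsB space 0 seq.toList).length := by
        have := List.getElem?_eq_some_iff.mp (by simpa using hget)
        exact this.1
      have hcond : position < ((pvIdxsB space 0 seq.toList).length : Int) := by omega
      rw [if_pos hcond, hget]
      simp
    | none =>
      rw [hn] at hget
      have hk : (pvIdxsB space 0 seq.toList).length ≤ position.toNat := by
        have := List.getElem?_eq_none_iff.mp (by simpa using hget)
        omega
      have hcond : ¬ position < ((pvIdxsB space 0 seq.toList).length : Int) := by omega
      rw [if_neg hcond]
      simp
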